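-- pv_equiv track=rewrite | github.com/euwillian/bootcamp-python | day08/task_2.py | calculate_love_score
-- ===== SOURCE A (Python) =====
-- def calculate_love_score(name1: str, name2: str) -> str:
--     """
--     1. Take both people's names and check for the number of times the letters in the word TRUE occurs.
--
--     2. Then check for the number of times the letters in the word LOVE occurs.
--
--     3. Then combine these numbers to make a 2-digit number and print it out.
--
--     """
--
--     is_true = "true"
--     is_love = "love"
--
--     combined_name = (name1 + name2).lower()
--     cont_true = 0
--     cont_love = 0
--
--     for i in range(4):
--         cont_true += combined_name.count(is_true[i])
--         cont_love += combined_name.count(is_love[i])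
--
--     return str(cont_true) + str(cont_love)
-- ===== SOURCE B (Python) =====
-- def calculate_love_score(name1: str, name2: str) -> str:
--     cont_true = 0
--     cont_love = 0
--     for ch in (name1 + name2).lower():
--         if ch in "true":
--             cont_true += 1
--         if ch in "love":
--             cont_love += 1
--     return str(cont_true) + str(cont_love)
-- ===== Notes on version B (the rewrite author's own statement) =====
-- stated objective: idiomatic
-- what changed: One pass over the combined lowercased string with two accumulators (membership tests per character) instead of eight full .count scans driven by range(4); 'e' naturally feeds both tallies.
import Mathlib
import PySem

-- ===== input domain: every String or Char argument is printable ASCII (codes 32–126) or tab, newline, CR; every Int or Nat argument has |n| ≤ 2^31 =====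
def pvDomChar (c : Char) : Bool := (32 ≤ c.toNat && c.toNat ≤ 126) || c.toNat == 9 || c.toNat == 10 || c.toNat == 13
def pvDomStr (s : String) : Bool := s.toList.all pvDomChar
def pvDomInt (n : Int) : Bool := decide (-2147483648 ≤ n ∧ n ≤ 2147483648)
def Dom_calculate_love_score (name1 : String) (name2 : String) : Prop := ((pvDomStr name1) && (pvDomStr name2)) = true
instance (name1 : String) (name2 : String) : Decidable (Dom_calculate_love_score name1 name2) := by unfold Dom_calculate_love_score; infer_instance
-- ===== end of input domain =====

-- B replaces A's eight range(4)-driven str.count scans by a single pass over the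
-- combined lowercased string with two accumulators (objective: idiomatic one-pass form).


-- ===== PORT A =====
-- literal transliteration of A: range(4) loop, each step adding combined_name.count(is_true[i])
-- and combined_name.count(is_love[i]); the .getD ' ' is a totality guard for the (unreachable)
-- IndexError case of is_true[i]/is_love[i].
def calculate_love_score (name1 : String) (name2 : String) : String :=
  let is_true := "true"
  let is_love := "love"
  let combined_name := PySem.Str.lower (name1 ++ name2)
  let p := (PySem.List.pyRange 0 4 1).foldl
    (fun (p : Int × Int) i =>
      (p.1 + (PySem.Str.count combined_name (String.mk [(PySem.Str.pyGet? is_true i).getD ' ']) : Int),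
       p.2 + (PySem.Str.count combined_name (String.mk [(PySem.Str.pyGet? is_love i).getD ' ']) : Int)))
    (0, 0)
  PySem.Int.toStr p.1 ++ PySem.Int.toStr p.2

-- ===== PORT B =====
-- literal transliteration of B: one fold over the characters of the combined lowercased
-- string, two accumulators; 'ch in "true"' on a single character is char membership.
def calculate_love_score_alt (name1 : String) (name2 : String) : String :=
  let p := (PySem.Str.lower (name1 ++ name2)).toList.foldl
    (fun (p : Int × Int) ch =>
      (if ch ∈ ['t', 'r', 'u', 'e'] then p.1 + 1 else p.1,
       if ch ∈ ['l', 'o', 'v', 'e'] then p.2 + 1 else p.2))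
    (0, 0)
  PySem.Int.toStr p.1 ++ PySem.Int.toStr p.2

-- ===== PRECONDITION & SPEC =====
def Spec_calculate_love_score (name1 : String) (name2 : String) (out : String) : Prop := out = calculate_love_score_alt name1 name2
instance (name1 : String) (name2 : String) (out : String) : Decidable (Spec_calculate_love_score name1 name2 out) := by unfold Spec_calculate_love_score; infer_instance

-- ===== CLAIM (what is proved, stated in full; the proofs are below) =====
def Claim_equal_calculate_love_score : Prop := ∀ (name1 : String) (name2 : String), Dom_calculate_love_score name1 name2 → Spec_calculate_love_score name1 name2 (calculate_love_score name1 name2)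

-- ===== LEMMAS AND PROOFS =====

-- str.count with a single-character needle is the character count.
theorem count_go_singleton (c : Char) (l : List Char) (acc fuel : Nat)
    (h : l.length ≤ fuel) :
    PySem.Chars.count.go [c] fuel l acc = acc + l.count c := by
  induction l generalizing acc fuel with
  | nil => cases fuel <;> simp [PySem.Chars.count.go]
  | cons x t ih =>
    cases fuel with
    | zero => simp at h
    | succ n =>
      have ht : t.length ≤ n := by simpa using h
      have step : PySem.Chars.count.go [c] (n + 1) (x :: t) acc =
          if c == x then PySem.Chars.count.go [c] n t (acc + 1)
          else PySem.Chars.count.go [c] n t acc := by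
        simp [PySem.Chars.count.go, List.isPrefixOf]
      rw [step]
      by_cases hx : c = x
      · subst hx
        rw [if_pos (by simp), ih _ _ ht]
        simp [List.count_cons]
        omega
      · rw [if_neg (by simpa using hx), ih _ _ ht]
        have hxc : (x == c) = false := by simpa using fun h' : x = c => hx h'.symm
        simp [List.count_cons, hxc]

theorem count_singleton (l : List Char) (c : Char) :
    PySem.Chars.count l [c] = l.count c := by
  simp [PySem.Chars.count, count_go_singleton c l 0 l.length (le_refl _)]

-- the one-pass fold of B computed from the two countP's
theorem alt_fold (cs : List Char) (a b : Int) :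
    cs.foldl
      (fun (p : Int × Int) ch =>
        (if ch ∈ ['t', 'r', 'u', 'e'] then p.1 + 1 else p.1,
         if ch ∈ ['l', 'o', 'v', 'e'] then p.2 + 1 else p.2))
      (a, b)
    = (a + (cs.countP (fun c => decide (c ∈ ['t', 'r', 'u', 'e'])) : Int),
       b + (cs.countP (fun c => decide (c ∈ ['l', 'o', 'v', 'e'])) : Int)) := by
  induction cs generalizing a b with
  | nil => simp
  | cons c t ih =>
    simp only [List.foldl_cons, List.countP_cons, ih]
    by_cases h1 : c ∈ ['t', 'r', 'u', 'e'] <;>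
      by_cases h2 : c ∈ ['l', 'o', 'v', 'e'] <;>
      simp [h1, h2, Prod.ext_iff] <;> push_cast <;> omega

theorem countP_quad (c1 c2 c3 c4 : Char) (cs : List Char)
    (h12 : c1 ≠ c2) (h13 : c1 ≠ c3) (h14 : c1 ≠ c4)
    (h23 : c2 ≠ c3) (h24 : c2 ≠ c4) (h34 : c3 ≠ c4) :
    cs.countP (fun c => decide (c ∈ [c1, c2, c3, c4]))
      = cs.count c1 + cs.count c2 + cs.count c3 + cs.count c4 := by
  induction cs with
  | nil => simp
  | cons c t ih =>
    simp only [List.countP_cons, List.count_cons, ih]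
    by_cases e1 : c = c1 <;> by_cases e2 : c = c2 <;> by_cases e3 : c = c3 <;>
      by_cases e4 : c = c4 <;> simp_all <;> omega

-- ===== VERDICT (by name: the statement is the Claim_ definition above) =====
theorem calculate_love_score_spec : Claim_equal_calculate_love_score := by
  intro name1 name2 _
  unfold Spec_calculate_love_score calculate_love_score calculate_love_score_alt
  rw [show PySem.List.pyRange 0 4 1 = [0, 1, 2, 3] by decide, alt_fold]
  simp only [List.foldl_cons, List.foldl_nil,
    show (PySem.Str.pyGet? "true" 0).getD ' ' = 't' by decide,
    show (PySem.Str.pyGet? "true" 1).getD ' ' = 'r' by decide,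
    show (PySem.Str.pyGet? "true" 2).getD ' ' = 'u' by decide,
    show (PySem.Str.pyGet? "true" 3).getD ' ' = 'e' by decide,
    show (PySem.Str.pyGet? "love" 0).getD ' ' = 'l' by decide,
    show (PySem.Str.pyGet? "love" 1).getD ' ' = 'o' by decide,
    show (PySem.Str.pyGet? "love" 2).getD ' ' = 'v' by decide,
    show (PySem.Str.pyGet? "love" 3).getD ' ' = 'e' by decide,
    PySem.Str.count_eq,
    show (String.mk ['t']).toList = ['t'] by decide,
    show (String.mk ['r']).toList = ['r'] by decide,
    show (String.mk ['u']).toList = ['u'] by decide,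
    show (String.mk ['e']).toList = ['e'] by decide,
    show (String.mk ['l']).toList = ['l'] by decide,
    show (String.mk ['o']).toList = ['o'] by decide,
    show (String.mk ['v']).toList = ['v'] by decide,
    count_singleton,
    countP_quad 't' 'r' 'u' 'e' _ (by decide) (by decide) (by decide) (by decide) (by decide) (by decide),
    countP_quad 'l' 'o' 'v' 'e' _ (by decide) (by decide) (by decide) (by decide) (by decide) (by decide)]
  rw [show ∀ a b c d : Nat, (0 : Int) + ↑a + ↑b + ↑c + ↑d = 0 + ↑(a + b + c + d) from
    fun a b c d => by push_cast; ring]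
  rw [show ∀ a b c d : Nat, (0 : Int) + ↑a + ↑b + ↑c + ↑d = 0 + ↑(a + b + c + d) from
    fun a b c d => by push_cast; ring]
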